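-- pv_equiv track=rewrite | github.com/shirinalapati/Internship-App | job_scrapers/scrape_github_internships.py | infer_skills_from_title_aggressive
-- ===== SOURCE A (Python) =====
-- def infer_skills_from_title_aggressive(job_title):
--     """
--     AGGRESSIVELY infer role-specific skills from job title.
--     Every job gets unique, relevant skills based on its title.
--     """
--     title_lower = job_title.lower()
--     skills = []
--
--     # Extract specific technologies mentioned in title
--     tech_map = {
--         'react': 'React', 'angular': 'Angular', 'vue': 'Vue',
--         'python': 'Python', 'java': 'Java', 'javascript': 'JavaScript',
--         'typescript': 'TypeScript', 'go': 'Go', 'rust': 'Rust',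
--         'c++': 'C++', 'c#': 'C#', 'swift': 'Swift', 'kotlin': 'Kotlin',
--         'aws': 'AWS', 'azure': 'Azure', 'gcp': 'GCP',
--         'docker': 'Docker', 'kubernetes': 'Kubernetes',
--         'node': 'Node.js', 'sql': 'SQL', '.net': '.NET'
--     }
--
--     for keyword, tech in tech_map.items():
--         if keyword in title_lower:
--             skills.append(tech)
--
--     # Role-based skill inference (order matters - check specific before generic)
--     if "frontend" in title_lower or "front-end" in title_lower or "front end" in title_lower:
--         skills.extend(['JavaScript', 'React', 'HTML', 'CSS', 'TypeScript', 'Frontend Development'])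
--     elif "backend" in title_lower or "back-end" in title_lower or "back end" in title_lower:
--         skills.extend(['Python', 'Java', 'SQL', 'API Development', 'Backend Development', 'REST APIs'])
--     elif "full stack" in title_lower or "fullstack" in title_lower or "full-stack" in title_lower:
--         skills.extend(['JavaScript', 'Python', 'SQL', 'React', 'Node.js', 'Full Stack Development'])
--     elif "mobile" in title_lower:
--         skills.extend(['Mobile Development', 'Swift', 'Kotlin', 'Java', 'iOS', 'Android'])
--     elif "data scien" in title_lower or "data analy" in title_lower:
--         skills.extend(['Python', 'SQL', 'Data Analysis', 'Machine Learning', 'Statistics', 'Pandas'])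
--     elif "data engineer" in title_lower or ("data" in title_lower and "engineer" in title_lower):
--         skills.extend(['Python', 'SQL', 'ETL', 'Data Pipelines', 'Spark', 'Data Engineering'])
--     elif "machine learning" in title_lower or "ml engineer" in title_lower or " ai " in title_lower:
--         skills.extend(['Python', 'Machine Learning', 'TensorFlow', 'PyTorch', 'Deep Learning'])
--     elif "devops" in title_lower or "sre" in title_lower:
--         skills.extend(['AWS', 'Docker', 'Kubernetes', 'CI/CD', 'Linux', 'DevOps'])
--     elif "cloud" in title_lower:
--         skills.extend(['AWS', 'Azure', 'Cloud Computing', 'Docker', 'Python'])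
--     elif "security" in title_lower or "cybersecurity" in title_lower or "cyber" in title_lower:
--         skills.extend(['Cybersecurity', 'Network Security', 'Python', 'Security Analysis'])
--     elif "qa" in title_lower or "test" in title_lower or "sdet" in title_lower or "quality" in title_lower:
--         skills.extend(['Testing', 'Test Automation', 'Selenium', 'Python', 'Java', 'QA'])
--     elif "embedded" in title_lower or "firmware" in title_lower:
--         skills.extend(['C++', 'C', 'Embedded Systems', 'Firmware', 'Hardware'])
--     elif "ios" in title_lower:
--         skills.extend(['Swift', 'iOS', 'Xcode', 'Mobile Development'])
--     elif "android" in title_lower: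
--         skills.extend(['Kotlin', 'Java', 'Android', 'Mobile Development'])
--     elif "automation" in title_lower:
--         skills.extend(['Python', 'Automation', 'Testing', 'Scripting'])
--     elif "database" in title_lower or "dba" in title_lower:
--         skills.extend(['SQL', 'Database Design', 'MySQL', 'PostgreSQL'])
--     elif "salesforce" in title_lower or "crm" in title_lower:
--         skills.extend(['Salesforce', 'CRM', 'Apex', 'Lightning'])
--     elif "infrastructure" in title_lower:
--         skills.extend(['Python', 'Infrastructure', 'Cloud Computing', 'DevOps'])
--     else:
--         # Generic software engineering - but still specific!
--         skills.extend(['Python', 'Java', 'Software Development', 'Algorithms', 'Data Structures'])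
--
--     # Remove duplicates while preserving order
--     seen = set()
--     unique_skills = []
--     for skill in skills:
--         if skill.lower() not in seen:
--             seen.add(skill.lower())
--             unique_skills.append(skill)
--
--     return unique_skills[:8]  # Limit to 8 skills
-- ===== SOURCE B (Python) =====
-- # Different algorithm: one sliding-window scan of the title collects the set of keywords
-- # that occur in it (window lengths = the keyword lengths), so every later keyword test is a
-- # set lookup instead of a scan of the title; the role comes from a keyword-data DNF table;
-- # the result is emitted by a recursive "emit head, filter ahead, stop at 8" pass that fuses
-- # the case-insensitive dedup with the 8-limit.
--
-- _TECH = [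
--     ('react', 'React'), ('angular', 'Angular'), ('vue', 'Vue'),
--     ('python', 'Python'), ('java', 'Java'), ('javascript', 'JavaScript'),
--     ('typescript', 'TypeScript'), ('go', 'Go'), ('rust', 'Rust'),
--     ('c++', 'C++'), ('c#', 'C#'), ('swift', 'Swift'), ('kotlin', 'Kotlin'),
--     ('aws', 'AWS'), ('azure', 'Azure'), ('gcp', 'GCP'),
--     ('docker', 'Docker'), ('kubernetes', 'Kubernetes'),
--     ('node', 'Node.js'), ('sql', 'SQL'), ('.net', '.NET'),
-- ]
--
-- # Each rule: (list of alternative clauses, skills); a clause matches when ALL its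
-- # keywords occur; a rule matches when ANY clause does; first matching rule wins.
-- _ROLES = [
--     ([["frontend"], ["front-end"], ["front end"]],
--      ['JavaScript', 'React', 'HTML', 'CSS', 'TypeScript', 'Frontend Development']),
--     ([["backend"], ["back-end"], ["back end"]],
--      ['Python', 'Java', 'SQL', 'API Development', 'Backend Development', 'REST APIs']),
--     ([["full stack"], ["fullstack"], ["full-stack"]],
--      ['JavaScript', 'Python', 'SQL', 'React', 'Node.js', 'Full Stack Development']),
--     ([["mobile"]],
--      ['Mobile Development', 'Swift', 'Kotlin', 'Java', 'iOS', 'Android']),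
--     ([["data scien"], ["data analy"]],
--      ['Python', 'SQL', 'Data Analysis', 'Machine Learning', 'Statistics', 'Pandas']),
--     ([["data engineer"], ["data", "engineer"]],
--      ['Python', 'SQL', 'ETL', 'Data Pipelines', 'Spark', 'Data Engineering']),
--     ([["machine learning"], ["ml engineer"], [" ai "]],
--      ['Python', 'Machine Learning', 'TensorFlow', 'PyTorch', 'Deep Learning']),
--     ([["devops"], ["sre"]],
--      ['AWS', 'Docker', 'Kubernetes', 'CI/CD', 'Linux', 'DevOps']),
--     ([["cloud"]],
--      ['AWS', 'Azure', 'Cloud Computing', 'Docker', 'Python']),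
--     ([["security"], ["cybersecurity"], ["cyber"]],
--      ['Cybersecurity', 'Network Security', 'Python', 'Security Analysis']),
--     ([["qa"], ["test"], ["sdet"], ["quality"]],
--      ['Testing', 'Test Automation', 'Selenium', 'Python', 'Java', 'QA']),
--     ([["embedded"], ["firmware"]],
--      ['C++', 'C', 'Embedded Systems', 'Firmware', 'Hardware']),
--     ([["ios"]], ['Swift', 'iOS', 'Xcode', 'Mobile Development']),
--     ([["android"]], ['Kotlin', 'Java', 'Android', 'Mobile Development']),
--     ([["automation"]], ['Python', 'Automation', 'Testing', 'Scripting']),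
--     ([["database"], ["dba"]],
--      ['SQL', 'Database Design', 'MySQL', 'PostgreSQL']),
--     ([["salesforce"], ["crm"]],
--      ['Salesforce', 'CRM', 'Apex', 'Lightning']),
--     ([["infrastructure"]],
--      ['Python', 'Infrastructure', 'Cloud Computing', 'DevOps']),
-- ]
--
-- _GENERIC = ['Python', 'Java', 'Software Development', 'Algorithms', 'Data Structures']
--
--
-- _KEYWORDS = frozenset(kw for kw, _ in _TECH) | {k for clauses, _ in _ROLES for c in clauses for k in c}
-- _LENGTHS = [2, 3, 4, 5, 6, 7, 8, 9, 10, 11, 13, 14, 16]  # the distinct keyword lengths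
--
--
-- def _pick(cands, k):
--     """First k candidates, dropping later case-insensitive duplicates ahead of time."""
--     if k == 0 or not cands:
--         return []
--     head = cands[0]
--     return [head] + _pick([c for c in cands[1:] if c.lower() != head.lower()], k - 1)
--
--
-- def infer_skills_from_title_aggressive(job_title):
--     t = job_title.lower()
--     n = len(t)
--     # one pass over the window positions: which keywords occur in the title?
--     matched = {t[i:i + L] for L in _LENGTHS for i in range(n - L + 1) if t[i:i + L] in _KEYWORDS}
--     cands = [tech for kw, tech in _TECH if kw in matched]
--     for clauses, role_skills in _ROLES:
--         if any(all(k in matched for k in clause) for clause in clauses):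
--             cands += role_skills
--             break
--     else:
--         cands += _GENERIC
--     return _pick(cands, 8)
-- ===== Notes on version B (the rewrite author's own statement) =====
-- stated objective: alternative
-- what changed: B builds a substring index (set of all substrings of length <= 16) once so every keyword test becomes a set lookup instead of a scan of the title, drives role selection from a keyword-data DNF table instead of an if/elif chain, and replaces the seen-set dedup fold plus [:8] slice by a recursive emit-head/filter-ahead pass that stops after 8 outputs.
import Mathlib
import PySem

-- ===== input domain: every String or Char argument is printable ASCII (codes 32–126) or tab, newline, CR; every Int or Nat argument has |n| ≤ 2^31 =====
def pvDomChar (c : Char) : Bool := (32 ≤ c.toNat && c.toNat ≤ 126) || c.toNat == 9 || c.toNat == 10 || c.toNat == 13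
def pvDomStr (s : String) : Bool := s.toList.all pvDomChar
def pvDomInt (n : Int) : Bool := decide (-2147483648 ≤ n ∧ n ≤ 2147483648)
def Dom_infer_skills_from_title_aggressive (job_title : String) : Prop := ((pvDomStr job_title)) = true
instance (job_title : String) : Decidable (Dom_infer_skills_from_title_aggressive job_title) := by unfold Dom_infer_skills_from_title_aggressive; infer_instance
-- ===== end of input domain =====

-- B scans the title's windows once, collecting the set of keywords that occur, so keyword
-- tests are set lookups; the role comes from a keyword-data DNF table; the deduped first 8
-- are emitted by a recursive filter-ahead pass (objective: alternative structure).

-- ===== PORT A =====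
-- the tech_map dict literal (shared: the identical literal appears in both Pythons)
def pvTechMap : List (String × String) :=
  [("react", "React"), ("angular", "Angular"), ("vue", "Vue"),
   ("python", "Python"), ("java", "Java"), ("javascript", "JavaScript"),
   ("typescript", "TypeScript"), ("go", "Go"), ("rust", "Rust"),
   ("c++", "C++"), ("c#", "C#"), ("swift", "Swift"), ("kotlin", "Kotlin"),
   ("aws", "AWS"), ("azure", "Azure"), ("gcp", "GCP"),
   ("docker", "Docker"), ("kubernetes", "Kubernetes"),
   ("node", "Node.js"), ("sql", "SQL"), (".net", ".NET")]

def infer_skills_from_title_aggressive (job_title : String) : List String :=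
  let t := PySem.Str.lower job_title
  -- for keyword, tech in tech_map.items(): if keyword in title_lower: skills.append(tech)
  let skills : List String :=
    pvTechMap.foldl (fun acc kv => if PySem.Str.isIn kv.1 t then acc ++ [kv.2] else acc) []
  -- if/elif role chain, in source order
  let skills : List String :=
    if PySem.Str.isIn "frontend" t || PySem.Str.isIn "front-end" t || PySem.Str.isIn "front end" t then
      skills ++ ["JavaScript", "React", "HTML", "CSS", "TypeScript", "Frontend Development"]
    else if PySem.Str.isIn "backend" t || PySem.Str.isIn "back-end" t || PySem.Str.isIn "back end" t then
      skills ++ ["Python", "Java", "SQL", "API Development", "Backend Development", "REST APIs"]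
    else if PySem.Str.isIn "full stack" t || PySem.Str.isIn "fullstack" t || PySem.Str.isIn "full-stack" t then
      skills ++ ["JavaScript", "Python", "SQL", "React", "Node.js", "Full Stack Development"]
    else if PySem.Str.isIn "mobile" t then
      skills ++ ["Mobile Development", "Swift", "Kotlin", "Java", "iOS", "Android"]
    else if PySem.Str.isIn "data scien" t || PySem.Str.isIn "data analy" t then
      skills ++ ["Python", "SQL", "Data Analysis", "Machine Learning", "Statistics", "Pandas"]
    else if PySem.Str.isIn "data engineer" t || (PySem.Str.isIn "data" t && PySem.Str.isIn "engineer" t) then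
      skills ++ ["Python", "SQL", "ETL", "Data Pipelines", "Spark", "Data Engineering"]
    else if PySem.Str.isIn "machine learning" t || PySem.Str.isIn "ml engineer" t || PySem.Str.isIn " ai " t then
      skills ++ ["Python", "Machine Learning", "TensorFlow", "PyTorch", "Deep Learning"]
    else if PySem.Str.isIn "devops" t || PySem.Str.isIn "sre" t then
      skills ++ ["AWS", "Docker", "Kubernetes", "CI/CD", "Linux", "DevOps"]
    else if PySem.Str.isIn "cloud" t then
      skills ++ ["AWS", "Azure", "Cloud Computing", "Docker", "Python"]
    else if PySem.Str.isIn "security" t || PySem.Str.isIn "cybersecurity" t || PySem.Str.isIn "cyber" t then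
      skills ++ ["Cybersecurity", "Network Security", "Python", "Security Analysis"]
    else if PySem.Str.isIn "qa" t || PySem.Str.isIn "test" t || PySem.Str.isIn "sdet" t || PySem.Str.isIn "quality" t then
      skills ++ ["Testing", "Test Automation", "Selenium", "Python", "Java", "QA"]
    else if PySem.Str.isIn "embedded" t || PySem.Str.isIn "firmware" t then
      skills ++ ["C++", "C", "Embedded Systems", "Firmware", "Hardware"]
    else if PySem.Str.isIn "ios" t then
      skills ++ ["Swift", "iOS", "Xcode", "Mobile Development"]
    else if PySem.Str.isIn "android" t then
      skills ++ ["Kotlin", "Java", "Android", "Mobile Development"]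
    else if PySem.Str.isIn "automation" t then
      skills ++ ["Python", "Automation", "Testing", "Scripting"]
    else if PySem.Str.isIn "database" t || PySem.Str.isIn "dba" t then
      skills ++ ["SQL", "Database Design", "MySQL", "PostgreSQL"]
    else if PySem.Str.isIn "salesforce" t || PySem.Str.isIn "crm" t then
      skills ++ ["Salesforce", "CRM", "Apex", "Lightning"]
    else if PySem.Str.isIn "infrastructure" t then
      skills ++ ["Python", "Infrastructure", "Cloud Computing", "DevOps"]
    else
      skills ++ ["Python", "Java", "Software Development", "Algorithms", "Data Structures"]
  -- seen = set(); for skill in skills: if skill.lower() not in seen: seen.add(..); unique.append(skill)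
  let r := skills.foldl
    (fun (p : PySem.Set String × List String) s =>
      if PySem.Set.contains p.1 (PySem.Str.lower s) then p
      else (PySem.Set.add p.1 (PySem.Str.lower s), p.2 ++ [s]))
    (PySem.Set.empty, [])
  PySem.List.slice r.2 none (some 8)

-- ===== PORT B =====
-- _ROLES of Source B: (list of alternative clauses, skills); a clause is a keyword conjunction
def pvRoles : List (List (List String) × List String) :=
  [([["frontend"], ["front-end"], ["front end"]],
    ["JavaScript", "React", "HTML", "CSS", "TypeScript", "Frontend Development"]),
   ([["backend"], ["back-end"], ["back end"]],
    ["Python", "Java", "SQL", "API Development", "Backend Development", "REST APIs"]),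
   ([["full stack"], ["fullstack"], ["full-stack"]],
    ["JavaScript", "Python", "SQL", "React", "Node.js", "Full Stack Development"]),
   ([["mobile"]],
    ["Mobile Development", "Swift", "Kotlin", "Java", "iOS", "Android"]),
   ([["data scien"], ["data analy"]],
    ["Python", "SQL", "Data Analysis", "Machine Learning", "Statistics", "Pandas"]),
   ([["data engineer"], ["data", "engineer"]],
    ["Python", "SQL", "ETL", "Data Pipelines", "Spark", "Data Engineering"]),
   ([["machine learning"], ["ml engineer"], [" ai "]],
    ["Python", "Machine Learning", "TensorFlow", "PyTorch", "Deep Learning"]),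
   ([["devops"], ["sre"]],
    ["AWS", "Docker", "Kubernetes", "CI/CD", "Linux", "DevOps"]),
   ([["cloud"]],
    ["AWS", "Azure", "Cloud Computing", "Docker", "Python"]),
   ([["security"], ["cybersecurity"], ["cyber"]],
    ["Cybersecurity", "Network Security", "Python", "Security Analysis"]),
   ([["qa"], ["test"], ["sdet"], ["quality"]],
    ["Testing", "Test Automation", "Selenium", "Python", "Java", "QA"]),
   ([["embedded"], ["firmware"]],
    ["C++", "C", "Embedded Systems", "Firmware", "Hardware"]),
   ([["ios"]], ["Swift", "iOS", "Xcode", "Mobile Development"]),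
   ([["android"]], ["Kotlin", "Java", "Android", "Mobile Development"]),
   ([["automation"]], ["Python", "Automation", "Testing", "Scripting"]),
   ([["database"], ["dba"]],
    ["SQL", "Database Design", "MySQL", "PostgreSQL"]),
   ([["salesforce"], ["crm"]],
    ["Salesforce", "CRM", "Apex", "Lightning"]),
   ([["infrastructure"]],
    ["Python", "Infrastructure", "Cloud Computing", "DevOps"])]

def pvGeneric : List String :=
  ["Python", "Java", "Software Development", "Algorithms", "Data Structures"]

-- _KEYWORDS = frozenset(kw for kw, _ in _TECH) | {k for clauses, _ in _ROLES for c in clauses for k in c}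
def pvKeywords : PySem.Set String :=
  PySem.Set.union (PySem.Set.ofList (pvTechMap.map Prod.fst))
    (pvRoles.flatMap (fun r => r.1.flatten))

-- _LENGTHS = [2, 3, ...]: the distinct keyword lengths
def pvLens : List Int := [2, 3, 4, 5, 6, 7, 8, 9, 10, 11, 13, 14, 16]

-- matched = {t[i:i+L] for L in _LENGTHS for i in range(n - L + 1) if t[i:i+L] in _KEYWORDS}
def pvMatched (t : String) : PySem.Set String :=
  PySem.Set.ofList
    (pvLens.flatMap (fun L =>
      (PySem.List.pyRange 0 (PySem.Str.len t - L + 1) 1).filterMap (fun i =>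
        if PySem.Set.contains pvKeywords (PySem.Str.slice t (some i) (some (i + L))) then
          some (PySem.Str.slice t (some i) (some (i + L)))
        else none)))

-- the for/else scan of _ROLES: first rule whose DNF matches, else the generic list
def pvFirstRole (subs : PySem.Set String) : List (List (List String) × List String) → List String
  | [] => pvGeneric
  | r :: rs =>
    if r.1.any (fun clause => clause.all (fun k => PySem.Set.contains subs k)) then r.2
    else pvFirstRole subs rs

-- _pick(cands, k): emit the head, filter its case-duplicates ahead, stop at k = 0
def pvPick : Nat → List String → List String
  | 0, _ => []
  | _ + 1, [] => []
  | k + 1, h :: rest =>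
    h :: pvPick k (rest.filter (fun c => !(PySem.Str.lower c == PySem.Str.lower h)))

def infer_skills_from_title_aggressive_alt (job_title : String) : List String :=
  let t := PySem.Str.lower job_title
  let subs := pvMatched t
  let cands := (pvTechMap.filter (fun kv => PySem.Set.contains subs kv.1)).map (fun kv => kv.2)
  let cands := cands ++ pvFirstRole subs pvRoles
  pvPick 8 cands

-- ===== PRECONDITION & SPEC =====
def Spec_infer_skills_from_title_aggressive (job_title : String) (out : List String) : Prop := out = infer_skills_from_title_aggressive_alt job_title
instance (job_title : String) (out : List String) : Decidable (Spec_infer_skills_from_title_aggressive job_title out) := by unfold Spec_infer_skills_from_title_aggressive; infer_instance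

-- ===== CLAIM (what is proved, stated in full; the proofs are below) =====
def Claim_equal_infer_skills_from_title_aggressive : Prop := ∀ (job_title : String), Dom_infer_skills_from_title_aggressive job_title → Spec_infer_skills_from_title_aggressive job_title (infer_skills_from_title_aggressive job_title)

-- ===== LEMMAS AND PROOFS =====

-- the window scan is a sound and complete keyword test: for a keyword of the tables
-- (in pvKeywords, with a length in pvLens), membership in pvMatched t is Python's 'kw in t'
theorem pv_contains_matched (t kw : String)
    (hin : PySem.Set.contains pvKeywords kw = true)
    (hL : ((kw.toList.length : Int)) ∈ pvLens) :
    PySem.Set.contains (pvMatched t) kw = PySem.Str.isIn kw t := by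
  have hge : ∀ x ∈ pvLens, (1 : Int) ≤ x := by decide
  have hk1 : 1 ≤ kw.toList.length := by exact_mod_cast hge _ hL
  apply Bool.eq_iff_iff.mpr
  rw [PySem.Str.isIn_iff_infix]
  have hc : PySem.Set.contains (pvMatched t) kw = true ↔ kw ∈ pvMatched t := by
    simp [PySem.Set.contains]
  rw [hc]
  unfold pvMatched
  rw [PySem.Set.mem_ofList, List.mem_flatMap]
  have hlen : PySem.Str.len t = (t.toList.length : Int) := by
    simp [PySem.Str.len]
  constructor
  · rintro ⟨L, hLmem, hkmem⟩
    rw [List.mem_filterMap] at hkmem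
    obtain ⟨i, hi, heq⟩ := hkmem
    rw [PySem.List.mem_pyRange_one] at hi
    have hgeL : (1 : Int) ≤ L := hge L hLmem
    split_ifs at heq with hb
    injection heq with heq
    have h0i : 0 ≤ i := hi.1
    have hmn : (i + L).toNat - i.toNat = L.toNat := by omega
    have hkwt : kw.toList = (t.toList.drop i.toNat).take L.toNat := by
      rw [← heq]
      rw [PySem.Str.toList_slice, PySem.Chars.slice_eq_listSlice]
      rw [PySem.List.slice_toNat _ h0i (by omega), hmn]
    rw [hkwt]
    exact ((List.take_prefix _ _).isInfix).trans (List.drop_suffix _ _).isInfix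
  · intro hinf
    obtain ⟨s1, s2, hsplit⟩ := hinf
    have hn : t.toList.length = s1.length + kw.toList.length + s2.length := by
      rw [← hsplit]; simp; omega
    refine ⟨(kw.toList.length : Int), hL, ?_⟩
    rw [List.mem_filterMap]
    refine ⟨(s1.length : Int), ?_, ?_⟩
    · rw [PySem.List.mem_pyRange_one, hlen]
      constructor
      · exact_mod_cast Nat.zero_le _
      · push_cast; omega
    · have hw : PySem.Str.slice t (some (s1.length : Int))
          (some ((s1.length : Int) + (kw.toList.length : Int))) = kw := by
        apply String.toList_inj.mp
        rw [PySem.Str.toList_slice, PySem.Chars.slice_eq_listSlice, PySem.List.slice_natCast_add]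
        rw [← hsplit, List.append_assoc, List.drop_left, List.take_left]
      rw [hw, if_pos hin]

-- proof-only: the result of A's seen-set dedup as a filter-ahead recursion
def pvDdl : List String → List String
  | [] => []
  | x :: xs => x :: pvDdl (xs.filter (fun s => !(PySem.Str.lower s == PySem.Str.lower x)))
termination_by l => l.length
decreasing_by
  simp only [List.length_cons, Nat.lt_succ_iff, List.length_unattach]
  exact le_trans (List.length_filter_le _ _) (by simp)

theorem pvDdl_nil : pvDdl [] = [] := by rw [pvDdl.eq_def]

theorem pvDdl_cons (x : String) (xs : List String) :
    pvDdl (x :: xs) = x :: pvDdl (xs.filter (fun s => !(PySem.Str.lower s == PySem.Str.lower x))) := by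
  rw [pvDdl.eq_def]

-- A's seen-set fold equals the filter-ahead recursion (invariant: seen = lowercased output)
theorem pv_dedup (l out : List String) :
    (l.foldl
      (fun (p : PySem.Set String × List String) s =>
        if PySem.Set.contains p.1 (PySem.Str.lower s) then p
        else (PySem.Set.add p.1 (PySem.Str.lower s), p.2 ++ [s]))
      (out.map PySem.Str.lower, out)).2
    = out ++ pvDdl (l.filter (fun s => !((out.map PySem.Str.lower).contains (PySem.Str.lower s)))) := by
  induction l generalizing out with
  | nil => simp [pvDdl_nil]
  | cons s l ih =>
    simp only [List.foldl_cons, List.filter_cons]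
    by_cases hb : PySem.Set.contains (List.map PySem.Str.lower out) (PySem.Str.lower s) = true
    · have hb' : (List.map PySem.Str.lower out).contains (PySem.Str.lower s) = true := hb
      simp only [hb, hb', if_true, Bool.not_true, Bool.false_eq_true, if_false]
      exact ih out
    · have hb0 : PySem.Set.contains (List.map PySem.Str.lower out) (PySem.Str.lower s) = false := by
        exact Bool.eq_false_iff.mpr (fun hx => hb hx)
      have hb0' : (List.map PySem.Str.lower out).contains (PySem.Str.lower s) = false := hb0
      simp only [hb0, hb0', Bool.false_eq_true, if_false, Bool.not_false, if_true]
      have hadd : PySem.Set.add (List.map PySem.Str.lower out) (PySem.Str.lower s)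
          = List.map PySem.Str.lower (out ++ [s]) := by
        show (if PySem.Set.contains (List.map PySem.Str.lower out) (PySem.Str.lower s) then _ else _) = _
        rw [hb0]
        simp
      rw [hadd, ih (out ++ [s]), pvDdl_cons]
      have hf : (l.filter (fun s' => !((out.map PySem.Str.lower).contains (PySem.Str.lower s')))).filter
            (fun s' => !(PySem.Str.lower s' == PySem.Str.lower s))
          = l.filter (fun s' => !(((out ++ [s]).map PySem.Str.lower).contains (PySem.Str.lower s'))) := by
        rw [List.filter_filter]
        apply List.filter_congr
        intro x _
        by_cases hx : PySem.Str.lower x = PySem.Str.lower s <;>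
          simp [hx]
      rw [hf]
      simp

theorem pv_dedup0 (l : List String) :
    (l.foldl
      (fun (p : PySem.Set String × List String) s =>
        if PySem.Set.contains p.1 (PySem.Str.lower s) then p
        else (PySem.Set.add p.1 (PySem.Str.lower s), p.2 ++ [s]))
      (PySem.Set.empty, [])).2 = pvDdl l := by
  simpa using pv_dedup l []

-- B's bounded pick is "dedup, then take k"
theorem pv_pick_eq (k : Nat) (l : List String) : pvPick k l = (pvDdl l).take k := by
  induction k generalizing l with
  | zero => cases l <;> simp [pvPick]
  | succ k ih =>
    cases l with
    | nil => simp [pvPick, pvDdl_nil]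
    | cons h rest => simp [pvPick, pvDdl_cons, ih]

-- B's role scan equals A's if/elif chain once lookups are read back as substring tests
set_option maxRecDepth 40000 in
set_option maxHeartbeats 4000000 in
theorem pv_roles_eq (t : String) :
    pvFirstRole (pvMatched t) pvRoles =
    (if PySem.Str.isIn "frontend" t || PySem.Str.isIn "front-end" t || PySem.Str.isIn "front end" t then
      ["JavaScript", "React", "HTML", "CSS", "TypeScript", "Frontend Development"]
    else if PySem.Str.isIn "backend" t || PySem.Str.isIn "back-end" t || PySem.Str.isIn "back end" t then
      ["Python", "Java", "SQL", "API Development", "Backend Development", "REST APIs"]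
    else if PySem.Str.isIn "full stack" t || PySem.Str.isIn "fullstack" t || PySem.Str.isIn "full-stack" t then
      ["JavaScript", "Python", "SQL", "React", "Node.js", "Full Stack Development"]
    else if PySem.Str.isIn "mobile" t then
      ["Mobile Development", "Swift", "Kotlin", "Java", "iOS", "Android"]
    else if PySem.Str.isIn "data scien" t || PySem.Str.isIn "data analy" t then
      ["Python", "SQL", "Data Analysis", "Machine Learning", "Statistics", "Pandas"]
    else if PySem.Str.isIn "data engineer" t || (PySem.Str.isIn "data" t && PySem.Str.isIn "engineer" t) then
      ["Python", "SQL", "ETL", "Data Pipelines", "Spark", "Data Engineering"]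
    else if PySem.Str.isIn "machine learning" t || PySem.Str.isIn "ml engineer" t || PySem.Str.isIn " ai " t then
      ["Python", "Machine Learning", "TensorFlow", "PyTorch", "Deep Learning"]
    else if PySem.Str.isIn "devops" t || PySem.Str.isIn "sre" t then
      ["AWS", "Docker", "Kubernetes", "CI/CD", "Linux", "DevOps"]
    else if PySem.Str.isIn "cloud" t then
      ["AWS", "Azure", "Cloud Computing", "Docker", "Python"]
    else if PySem.Str.isIn "security" t || PySem.Str.isIn "cybersecurity" t || PySem.Str.isIn "cyber" t then
      ["Cybersecurity", "Network Security", "Python", "Security Analysis"]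
    else if PySem.Str.isIn "qa" t || PySem.Str.isIn "test" t || PySem.Str.isIn "sdet" t || PySem.Str.isIn "quality" t then
      ["Testing", "Test Automation", "Selenium", "Python", "Java", "QA"]
    else if PySem.Str.isIn "embedded" t || PySem.Str.isIn "firmware" t then
      ["C++", "C", "Embedded Systems", "Firmware", "Hardware"]
    else if PySem.Str.isIn "ios" t then
      ["Swift", "iOS", "Xcode", "Mobile Development"]
    else if PySem.Str.isIn "android" t then
      ["Kotlin", "Java", "Android", "Mobile Development"]
    else if PySem.Str.isIn "automation" t then
      ["Python", "Automation", "Testing", "Scripting"]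
    else if PySem.Str.isIn "database" t || PySem.Str.isIn "dba" t then
      ["SQL", "Database Design", "MySQL", "PostgreSQL"]
    else if PySem.Str.isIn "salesforce" t || PySem.Str.isIn "crm" t then
      ["Salesforce", "CRM", "Apex", "Lightning"]
    else if PySem.Str.isIn "infrastructure" t then
      ["Python", "Infrastructure", "Cloud Computing", "DevOps"]
    else
      ["Python", "Java", "Software Development", "Algorithms", "Data Structures"]) := by
  have hk0 : PySem.Set.contains (pvMatched t) "frontend" = PySem.Str.isIn "frontend" t :=
    pv_contains_matched t "frontend" (by decide) (by decide)
  have hk1 : PySem.Set.contains (pvMatched t) "front-end" = PySem.Str.isIn "front-end" t :=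
    pv_contains_matched t "front-end" (by decide) (by decide)
  have hk2 : PySem.Set.contains (pvMatched t) "front end" = PySem.Str.isIn "front end" t :=
    pv_contains_matched t "front end" (by decide) (by decide)
  have hk3 : PySem.Set.contains (pvMatched t) "backend" = PySem.Str.isIn "backend" t :=
    pv_contains_matched t "backend" (by decide) (by decide)
  have hk4 : PySem.Set.contains (pvMatched t) "back-end" = PySem.Str.isIn "back-end" t :=
    pv_contains_matched t "back-end" (by decide) (by decide)
  have hk5 : PySem.Set.contains (pvMatched t) "back end" = PySem.Str.isIn "back end" t :=
    pv_contains_matched t "back end" (by decide) (by decide)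
  have hk6 : PySem.Set.contains (pvMatched t) "full stack" = PySem.Str.isIn "full stack" t :=
    pv_contains_matched t "full stack" (by decide) (by decide)
  have hk7 : PySem.Set.contains (pvMatched t) "fullstack" = PySem.Str.isIn "fullstack" t :=
    pv_contains_matched t "fullstack" (by decide) (by decide)
  have hk8 : PySem.Set.contains (pvMatched t) "full-stack" = PySem.Str.isIn "full-stack" t :=
    pv_contains_matched t "full-stack" (by decide) (by decide)
  have hk9 : PySem.Set.contains (pvMatched t) "mobile" = PySem.Str.isIn "mobile" t :=
    pv_contains_matched t "mobile" (by decide) (by decide)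
  have hk10 : PySem.Set.contains (pvMatched t) "data scien" = PySem.Str.isIn "data scien" t :=
    pv_contains_matched t "data scien" (by decide) (by decide)
  have hk11 : PySem.Set.contains (pvMatched t) "data analy" = PySem.Str.isIn "data analy" t :=
    pv_contains_matched t "data analy" (by decide) (by decide)
  have hk12 : PySem.Set.contains (pvMatched t) "data engineer" = PySem.Str.isIn "data engineer" t :=
    pv_contains_matched t "data engineer" (by decide) (by decide)
  have hk13 : PySem.Set.contains (pvMatched t) "data" = PySem.Str.isIn "data" t :=
    pv_contains_matched t "data" (by decide) (by decide)
  have hk14 : PySem.Set.contains (pvMatched t) "engineer" = PySem.Str.isIn "engineer" t :=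
    pv_contains_matched t "engineer" (by decide) (by decide)
  have hk15 : PySem.Set.contains (pvMatched t) "machine learning" = PySem.Str.isIn "machine learning" t :=
    pv_contains_matched t "machine learning" (by decide) (by decide)
  have hk16 : PySem.Set.contains (pvMatched t) "ml engineer" = PySem.Str.isIn "ml engineer" t :=
    pv_contains_matched t "ml engineer" (by decide) (by decide)
  have hk17 : PySem.Set.contains (pvMatched t) " ai " = PySem.Str.isIn " ai " t :=
    pv_contains_matched t " ai " (by decide) (by decide)
  have hk18 : PySem.Set.contains (pvMatched t) "devops" = PySem.Str.isIn "devops" t :=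
    pv_contains_matched t "devops" (by decide) (by decide)
  have hk19 : PySem.Set.contains (pvMatched t) "sre" = PySem.Str.isIn "sre" t :=
    pv_contains_matched t "sre" (by decide) (by decide)
  have hk20 : PySem.Set.contains (pvMatched t) "cloud" = PySem.Str.isIn "cloud" t :=
    pv_contains_matched t "cloud" (by decide) (by decide)
  have hk21 : PySem.Set.contains (pvMatched t) "security" = PySem.Str.isIn "security" t :=
    pv_contains_matched t "security" (by decide) (by decide)
  have hk22 : PySem.Set.contains (pvMatched t) "cybersecurity" = PySem.Str.isIn "cybersecurity" t :=
    pv_contains_matched t "cybersecurity" (by decide) (by decide)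
  have hk23 : PySem.Set.contains (pvMatched t) "cyber" = PySem.Str.isIn "cyber" t :=
    pv_contains_matched t "cyber" (by decide) (by decide)
  have hk24 : PySem.Set.contains (pvMatched t) "qa" = PySem.Str.isIn "qa" t :=
    pv_contains_matched t "qa" (by decide) (by decide)
  have hk25 : PySem.Set.contains (pvMatched t) "test" = PySem.Str.isIn "test" t :=
    pv_contains_matched t "test" (by decide) (by decide)
  have hk26 : PySem.Set.contains (pvMatched t) "sdet" = PySem.Str.isIn "sdet" t :=
    pv_contains_matched t "sdet" (by decide) (by decide)
  have hk27 : PySem.Set.contains (pvMatched t) "quality" = PySem.Str.isIn "quality" t :=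
    pv_contains_matched t "quality" (by decide) (by decide)
  have hk28 : PySem.Set.contains (pvMatched t) "embedded" = PySem.Str.isIn "embedded" t :=
    pv_contains_matched t "embedded" (by decide) (by decide)
  have hk29 : PySem.Set.contains (pvMatched t) "firmware" = PySem.Str.isIn "firmware" t :=
    pv_contains_matched t "firmware" (by decide) (by decide)
  have hk30 : PySem.Set.contains (pvMatched t) "ios" = PySem.Str.isIn "ios" t :=
    pv_contains_matched t "ios" (by decide) (by decide)
  have hk31 : PySem.Set.contains (pvMatched t) "android" = PySem.Str.isIn "android" t :=
    pv_contains_matched t "android" (by decide) (by decide)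
  have hk32 : PySem.Set.contains (pvMatched t) "automation" = PySem.Str.isIn "automation" t :=
    pv_contains_matched t "automation" (by decide) (by decide)
  have hk33 : PySem.Set.contains (pvMatched t) "database" = PySem.Str.isIn "database" t :=
    pv_contains_matched t "database" (by decide) (by decide)
  have hk34 : PySem.Set.contains (pvMatched t) "dba" = PySem.Str.isIn "dba" t :=
    pv_contains_matched t "dba" (by decide) (by decide)
  have hk35 : PySem.Set.contains (pvMatched t) "salesforce" = PySem.Str.isIn "salesforce" t :=
    pv_contains_matched t "salesforce" (by decide) (by decide)
  have hk36 : PySem.Set.contains (pvMatched t) "crm" = PySem.Str.isIn "crm" t :=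
    pv_contains_matched t "crm" (by decide) (by decide)
  have hk37 : PySem.Set.contains (pvMatched t) "infrastructure" = PySem.Str.isIn "infrastructure" t :=
    pv_contains_matched t "infrastructure" (by decide) (by decide)
  simp only [pvRoles, pvFirstRole, List.any_cons, List.any_nil, List.all_cons,
    List.all_nil, Bool.and_true, Bool.or_false, Bool.or_assoc, pvGeneric, hk0, hk1, hk2, hk3, hk4, hk5, hk6, hk7, hk8, hk9, hk10, hk11, hk12, hk13, hk14, hk15, hk16, hk17, hk18, hk19, hk20, hk21, hk22, hk23, hk24, hk25, hk26, hk27, hk28, hk29, hk30, hk31, hk32, hk33, hk34, hk35, hk36, hk37]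

-- the tech scans agree: B's index lookup is A's substring test on every table entry
set_option maxRecDepth 40000 in
set_option maxHeartbeats 4000000 in
theorem pv_tech_eq (t : String) :
    pvTechMap.filter (fun kv => PySem.Set.contains (pvMatched t) kv.1)
      = pvTechMap.filter (fun kv => PySem.Str.isIn kv.1 t) := by
  apply List.filter_congr
  have hok : ∀ kv ∈ pvTechMap,
      PySem.Set.contains pvKeywords kv.1 = true ∧ ((kv.1.toList.length : Int)) ∈ pvLens := by
    decide
  intro kv hkv
  exact pv_contains_matched t kv.1 (hok kv hkv).1 (hok kv hkv).2

-- appending a common prefix distributes over an if (pushes B's tech prefix into the chain)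
theorem pv_ite_append (b : Prop) [Decidable b] (M x y : List String) :
    M ++ (if b then x else y) = if b then M ++ x else M ++ y := by
  split_ifs <;> rfl

-- ===== VERDICT (by name: the statement is the Claim_ definition above) =====
set_option maxHeartbeats 2000000 in
theorem infer_skills_from_title_aggressive_spec : Claim_equal_infer_skills_from_title_aggressive := by
  intro jt _
  unfold Spec_infer_skills_from_title_aggressive infer_skills_from_title_aggressive
    infer_skills_from_title_aggressive_alt
  dsimp only
  rw [pv_dedup0, pv_pick_eq]
  have hsl : ∀ xs : List String, PySem.List.slice xs none (some 8) = xs.take 8 := by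
    intro xs
    rw [show (8 : Int) = ((8 : Nat) : Int) by norm_num, PySem.List.slice_to_natCast]
  rw [hsl]
  refine congrArg _ (congrArg _ ?_)
  rw [pv_roles_eq, pv_tech_eq]
  simp only [PySem.List.foldl_append_if, List.nil_append, pv_ite_append]
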